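-- pv_equiv track=rewrite | github.com/Torak28/Misc | 64/64_v3_12345_A+.py | add_move_to_heap
-- ===== SOURCE A (Python) =====
-- def add_move_to_heap(move, heap, itx, skip, old_itx, old_move):
--     if move[0][1] != "idle":
--         if len(heap) == 0:
--             if len(move) == 1:
--                 if move[0][1] != old_move or move[0][0] - old_itx > skip:
--                     heap.append(move[0])
--             else:
--                 if move[0][1] != old_move or move[0][0] - old_itx > skip:
--                     for elem in move:
--                         heap.append(elem)
--                         heap.append((itx, "idle"))
--         else:
--             heap_last_lst = list(filter(lambda x: x[1] != "idle", heap))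
--             if len(heap_last_lst) == 0:
--                 heap_last_lst = [(itx, "idle")]
--             for elem in move:
--                 if old_move != elem[1] and heap_last_lst[-1][1] != elem[1]:
--                     if heap_last_lst[-1][0] - elem[0] > skip:
--                         heap.append(elem)
--                         heap.append((itx, "idle"))
--                     else:
--                         heap.append((itx, "idle"))
--                         heap.append(elem)
--
--     return heap
-- ===== SOURCE B (Python) =====
-- # B computes the list of appended markers as a pure suffix (recursive, per-element
-- # contribution) and concatenates it to heap once; A mutates heap in place inside the
-- # loop.  Return value is identical; B does not mutate its heap argument.
--
-- def _last_active(heap, itx):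
--     # last non-idle element of heap, by one forward pass keeping the most recent
--     last = (itx, "idle")
--     for x in heap:
--         if x[1] != "idle":
--             last = x
--     return last
--
--
-- def _emit(move, last, itx, skip, old_move):
--     # suffix contributed by the non-empty-heap loop, built recursively
--     if not move:
--         return []
--     e = move[0]
--     tail = _emit(move[1:], last, itx, skip, old_move)
--     if old_move == e[1] or last[1] == e[1]:
--         return tail
--     if last[0] - e[0] > skip:
--         return [e, (itx, "idle")] + tail
--     return [(itx, "idle"), e] + tail
--
--
-- def _suffix(move, heap, itx, skip, old_itx, old_move):
--     if move[0][1] == "idle":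
--         return []
--     if not heap:
--         if move[0][1] == old_move and move[0][0] - old_itx <= skip:
--             return []
--         if len(move) == 1:
--             return [move[0]]
--         return [x for e in move for x in (e, (itx, "idle"))]
--     return _emit(move, _last_active(heap, itx), itx, skip, old_move)
--
--
-- def add_move_to_heap(move, heap, itx, skip, old_itx, old_move):
--     return heap + _suffix(move, heap, itx, skip, old_itx, old_move)
-- ===== Notes on version B (the rewrite author's own statement) =====
-- stated objective: alternative
-- what changed: B is purely functional: it computes the appended markers as a standalone suffix (structural recursion over move, last active element via one forward fold instead of A's filter pass) and concatenates it to heap once, instead of A's in-place append loop.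
import Mathlib
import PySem

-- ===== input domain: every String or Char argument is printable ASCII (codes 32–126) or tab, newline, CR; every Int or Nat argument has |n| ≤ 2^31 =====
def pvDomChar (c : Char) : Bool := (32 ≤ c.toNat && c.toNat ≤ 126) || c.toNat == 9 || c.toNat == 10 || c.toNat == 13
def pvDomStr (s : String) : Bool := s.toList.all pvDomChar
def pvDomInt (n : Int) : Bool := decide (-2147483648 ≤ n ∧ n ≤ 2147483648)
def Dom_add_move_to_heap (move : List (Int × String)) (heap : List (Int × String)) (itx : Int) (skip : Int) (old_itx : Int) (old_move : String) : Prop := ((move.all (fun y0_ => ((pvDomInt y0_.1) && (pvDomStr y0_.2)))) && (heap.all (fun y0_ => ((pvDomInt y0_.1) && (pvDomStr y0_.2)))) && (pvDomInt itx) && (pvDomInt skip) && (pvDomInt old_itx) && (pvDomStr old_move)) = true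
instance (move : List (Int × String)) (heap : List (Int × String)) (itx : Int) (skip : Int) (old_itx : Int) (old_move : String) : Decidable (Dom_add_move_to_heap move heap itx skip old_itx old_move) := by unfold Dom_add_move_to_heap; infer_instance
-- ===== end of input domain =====

-- B computes the appended markers as a pure suffix (structural recursion over move,
-- last active heap element via one forward fold) and concatenates it to heap once,
-- instead of A's in-place append loop with a filter pass; return value only — A mutates heap in place, B does not.


-- ===== PORT A =====
def add_move_to_heap (move : List (Int × String)) (heap : List (Int × String)) (itx : Int) (skip : Int) (old_itx : Int) (old_move : String) : List (Int × String) :=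
  match move with
  | [] => heap  -- Python raises IndexError on move[0]; excluded by Pre_
  | m0 :: _ =>
    if m0.2 ≠ "idle" then
      if heap.length = 0 then
        if move.length = 1 then
          if m0.2 ≠ old_move ∨ m0.1 - old_itx > skip then heap ++ [m0] else heap
        else
          if m0.2 ≠ old_move ∨ m0.1 - old_itx > skip then
            move.foldl (fun h elem => h ++ [elem, (itx, "idle")]) heap
          else heap
      else
        let hll0 := heap.filter (fun x => x.2 ≠ "idle")
        let hll := if hll0.length = 0 then [(itx, "idle")] else hll0
        let last := hll.getLastD (itx, "idle")  -- hll[-1]; hll is nonempty by construction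
        move.foldl (fun h elem =>
          if old_move ≠ elem.2 ∧ last.2 ≠ elem.2 then
            if last.1 - elem.1 > skip then h ++ [elem, (itx, "idle")]
            else h ++ [(itx, "idle"), elem]
          else h) heap
    else heap

-- ===== PORT B =====
-- last non-idle element of heap, by one forward pass keeping the most recent
def pvLastActive (heap : List (Int × String)) (itx : Int) : Int × String :=
  heap.foldl (fun last x => if x.2 ≠ "idle" then x else last) (itx, "idle")

-- suffix contributed by the non-empty-heap loop, built recursively
def pvEmit (move : List (Int × String)) (last : Int × String) (itx : Int) (skip : Int) (old_move : String) : List (Int × String) :=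
  match move with
  | [] => []
  | e :: rest =>
    let tail := pvEmit rest last itx skip old_move
    if old_move = e.2 ∨ last.2 = e.2 then tail
    else if last.1 - e.1 > skip then [e, (itx, "idle")] ++ tail
    else [(itx, "idle"), e] ++ tail

def pvSuffix (move : List (Int × String)) (heap : List (Int × String)) (itx : Int) (skip : Int) (old_itx : Int) (old_move : String) : List (Int × String) :=
  match move with
  | [] => []
  | m0 :: _ =>
    if m0.2 = "idle" then []
    else if heap = [] then
      if m0.2 = old_move ∧ m0.1 - old_itx ≤ skip then []
      else if move.length = 1 then [m0]
      else move.flatMap (fun e => [e, (itx, "idle")])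
    else pvEmit move (pvLastActive heap itx) itx skip old_move

def add_move_to_heap_alt (move : List (Int × String)) (heap : List (Int × String)) (itx : Int) (skip : Int) (old_itx : Int) (old_move : String) : List (Int × String) :=
  heap ++ pvSuffix move heap itx skip old_itx old_move

-- ===== PRECONDITION & SPEC =====
-- Pre_ excludes only the empty move list, on which Python A raises IndexError at move[0].
def Pre_add_move_to_heap (move : List (Int × String)) (heap : List (Int × String)) (itx : Int) (skip : Int) (old_itx : Int) (old_move : String) : Prop := move ≠ []
instance (move : List (Int × String)) (heap : List (Int × String)) (itx : Int) (skip : Int) (old_itx : Int) (old_move : String) : Decidable (Pre_add_move_to_heap move heap itx skip old_itx old_move) := by unfold Pre_add_move_to_heap; infer_instance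
def pvWitness_add_move_to_heap : (List (Int × String)) × (List (Int × String)) × Int × Int × Int × String := ([(3, "up")], [(1, "idle")], 2, 0, 0, "down")

def Spec_add_move_to_heap (move : List (Int × String)) (heap : List (Int × String)) (itx : Int) (skip : Int) (old_itx : Int) (old_move : String) (out : List (Int × String)) : Prop := out = add_move_to_heap_alt move heap itx skip old_itx old_move
instance (move : List (Int × String)) (heap : List (Int × String)) (itx : Int) (skip : Int) (old_itx : Int) (old_move : String) (out : List (Int × String)) : Decidable (Spec_add_move_to_heap move heap itx skip old_itx old_move out) := by unfold Spec_add_move_to_heap; infer_instance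

-- ===== CLAIM (what is proved, stated in full; the proofs are below) =====
def Claim_equal_add_move_to_heap : Prop := ∀ (move : List (Int × String)) (heap : List (Int × String)) (itx : Int) (skip : Int) (old_itx : Int) (old_move : String), Dom_add_move_to_heap move heap itx skip old_itx old_move → Pre_add_move_to_heap move heap itx skip old_itx old_move → Spec_add_move_to_heap move heap itx skip old_itx old_move (add_move_to_heap move heap itx skip old_itx old_move)

-- ===== LEMMAS AND PROOFS =====

-- B's forward fold keeps exactly the last element of A's filtered list (with default)
theorem foldl_keep_last_eq_filter_getLastD (l : List (Int × String)) (init : Int × String) :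
    l.foldl (fun last x => if x.2 ≠ "idle" then x else last) init
      = (l.filter (fun x => x.2 ≠ "idle")).getLastD init := by
  induction l generalizing init with
  | nil => rfl
  | cons x xs ih =>
    rw [List.foldl_cons]
    by_cases h : x.2 = "idle"
    · rw [if_neg (show ¬(x.2 ≠ "idle") from by simp [h]),
          ih, List.filter_cons_of_neg (by simp [h])]
    · rw [if_pos (show x.2 ≠ "idle" from h),
          ih, List.filter_cons_of_pos (by simp [h]), List.getLastD_cons]

-- A's last (filter + all-idle fallback + getLastD) equals B's pvLastActive
theorem lastA_eq_pvLastActive (heap : List (Int × String)) (itx : Int) :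
    (if (heap.filter (fun x => x.2 ≠ "idle")).length = 0 then [(itx, "idle")]
     else heap.filter (fun x => x.2 ≠ "idle")).getLastD (itx, "idle")
      = pvLastActive heap itx := by
  rw [pvLastActive, foldl_keep_last_eq_filter_getLastD]
  cases heap.filter (fun x => x.2 ≠ "idle") with
  | nil => rfl
  | cons y ys => simp

-- A's in-place append loop equals concatenating B's recursive suffix
theorem foldl_eq_append_pvEmit (last : Int × String) (itx : Int) (skip : Int)
    (old_move : String) (move : List (Int × String)) (acc : List (Int × String)) :
    move.foldl (fun h elem =>
        if old_move ≠ elem.2 ∧ last.2 ≠ elem.2 then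
          if last.1 - elem.1 > skip then h ++ [elem, (itx, "idle")]
          else h ++ [(itx, "idle"), elem]
        else h) acc
      = acc ++ pvEmit move last itx skip old_move := by
  induction move generalizing acc with
  | nil => simp [pvEmit]
  | cons e rest ih =>
    by_cases h1 : old_move = e.2 ∨ last.2 = e.2
    · have h2 : ¬(old_move ≠ e.2 ∧ last.2 ≠ e.2) := by tauto
      simp [List.foldl, pvEmit, h1, h2, ih]
    · have h2 : old_move ≠ e.2 ∧ last.2 ≠ e.2 := by tauto
      by_cases h3 : last.1 - e.1 > skip <;>
        simp [List.foldl, pvEmit, h1, h2, h3, ih]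

theorem add_move_to_heap_spec : Claim_equal_add_move_to_heap := by
  intro move heap itx skip old_itx old_move _dom hpre
  unfold Spec_add_move_to_heap add_move_to_heap_alt
  rcases move with _ | ⟨m0, rest⟩
  · exact absurd rfl hpre
  · by_cases hidle : m0.2 = "idle"
    · simp [add_move_to_heap, pvSuffix, hidle]
    · rcases heap with _ | ⟨h0, hs⟩
      · by_cases hc : m0.2 ≠ old_move ∨ m0.1 - old_itx > skip
        · have hcond : ¬(m0.2 = old_move ∧ m0.1 - old_itx ≤ skip) := by
            rcases hc with h | h
            · exact fun hx => h hx.1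
            · exact fun hx => absurd hx.2 (not_le.mpr h)
          simp only [add_move_to_heap, pvSuffix, List.nil_append]
          rw [if_pos hidle, if_pos (by simp : ([] : List (Int × String)).length = 0),
              if_neg hidle, if_pos trivial, if_neg hcond]
          by_cases hl : (m0 :: rest).length = 1
          · rw [if_pos hl, if_pos hl, if_pos hc]
          · rw [if_neg hl, if_neg hl, if_pos hc, PySem.List.foldl_append_eq_flatMap]
            simp
        · have hcond : m0.2 = old_move ∧ m0.1 - old_itx ≤ skip := by
            rw [not_or] at hc
            exact ⟨not_not.mp hc.1, not_lt.mp hc.2⟩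
          simp only [add_move_to_heap, pvSuffix, List.nil_append]
          rw [if_pos hidle, if_pos (by simp : ([] : List (Int × String)).length = 0),
              if_neg hidle, if_pos trivial, if_pos hcond]
          by_cases hl : (m0 :: rest).length = 1
          · rw [if_pos hl, if_neg hc]
          · rw [if_neg hl, if_neg hc]
      · simp only [add_move_to_heap, pvSuffix]
        rw [if_pos hidle, if_neg (by simp : ¬((h0 :: hs).length = 0)),
            if_neg hidle, if_neg (by simp : ¬(h0 :: hs = ([] : List (Int × String))))]
        rw [foldl_eq_append_pvEmit, ← lastA_eq_pvLastActive]
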